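-- pv_equiv track=rewrite | github.com/20jastrobel/TESTYTESTINGforTesting-For-Trying-Again | pydephasing/quantum/hubbard_latex_python_pairs.py | coord_to_site_index
-- ===== SOURCE A (Python) =====
-- from typing import Any, Callable, Dict, List, Optional, Sequence, Set, Tuple, Union
--
-- def coord_to_site_index(coord: Sequence[int], dims: Sequence[int]) -> int:
--     """Row-major linearization, x fastest: i = x + Lx*(y + Ly*(z + ...))."""
--     if len(coord) != len(dims):
--         log.error("coord and dims must have same length")
--     idx = 0
--     stride = 1
--     for a in range(len(dims)):
--         x = int(coord[a])
--         La = int(dims[a])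
--         if x < 0 or x >= La:
--             log.error("coord out of bounds")
--         idx += x * stride
--         stride *= La
--     return idx
-- ===== SOURCE B (Python) =====
-- def coord_to_site_index(coord, dims):
--     """Row-major linearization via Horner's rule, slowest axis first: i = x + Lx*(y + Ly*(z + ...))."""
--     if len(coord) != len(dims):
--         log.error("coord and dims must have same length")
--     idx = 0
--     for a in range(len(dims) - 1, -1, -1):
--         x = int(coord[a])
--         La = int(dims[a])
--         if x < 0 or x >= La:
--             log.error("coord out of bounds")
--         idx = idx * La + x
--     return idx
-- ===== Notes on version B (the rewrite author's own statement) =====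
-- stated objective: idiomatic
-- what changed: Replaces the forward pass that maintains a separate running stride with Horner's rule: a single accumulator updated as idx = idx*dims[a] + coord[a] while iterating the axes in reverse, keeping the module's own length/bounds validation.
import Mathlib
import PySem

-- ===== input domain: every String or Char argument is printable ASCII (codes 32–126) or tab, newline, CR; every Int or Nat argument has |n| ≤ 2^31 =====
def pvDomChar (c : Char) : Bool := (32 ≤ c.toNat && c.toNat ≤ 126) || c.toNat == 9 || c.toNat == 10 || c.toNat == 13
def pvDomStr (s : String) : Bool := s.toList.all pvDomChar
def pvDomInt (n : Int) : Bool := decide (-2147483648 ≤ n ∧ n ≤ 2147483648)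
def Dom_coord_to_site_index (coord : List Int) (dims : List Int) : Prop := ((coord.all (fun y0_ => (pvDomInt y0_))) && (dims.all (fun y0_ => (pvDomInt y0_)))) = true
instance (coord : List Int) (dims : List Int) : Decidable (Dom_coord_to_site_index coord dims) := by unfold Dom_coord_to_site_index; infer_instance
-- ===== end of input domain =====

-- B computes the same row-major index by Horner's rule over the reversed axis pairs
-- instead of a forward pass maintaining a running stride (objective: idiomatic).
-- A's `log` is an undefined name, so A raises NameError on a length mismatch or an
-- out-of-bounds coordinate; those inputs are outside Pre_.

-- ===== PORT A =====
-- for a in range(len(dims)): idx += coord[a]*stride; stride *= dims[a]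
-- pyGetD's default is never used inside Pre_ (the index is always in range there).
def coord_to_site_index (coord : List Int) (dims : List Int) : Int :=
  ((PySem.List.pyRange 0 (dims.length : Int) 1).foldl
    (fun (st : Int × Int) a =>
      (st.1 + PySem.List.pyGetD coord a 0 * st.2, st.2 * PySem.List.pyGetD dims a 0))
    (0, 1)).1

-- ===== PORT B =====
-- for a in range(len(dims)-1, -1, -1): idx = idx*dims[a] + coord[a]
-- (B keeps A's log.error validation; as in port A it raises only outside Pre_, so the
--  pyGetD default is never used inside Pre_.)
def coord_to_site_index_alt (coord : List Int) (dims : List Int) : Int :=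
  (PySem.List.pyRange ((dims.length : Int) - 1) (-1) (-1)).foldl
    (fun idx a => idx * PySem.List.pyGetD dims a 0 + PySem.List.pyGetD coord a 0) 0

-- ===== PRECONDITION & SPEC =====
-- Exactly the inputs on which A returns normally: matching lengths and every
-- coordinate inside its dimension's bounds (otherwise A's log.error raises NameError).
def Pre_coord_to_site_index (coord : List Int) (dims : List Int) : Prop :=
  coord.length = dims.length ∧ ∀ p ∈ coord.zip dims, 0 ≤ p.1 ∧ p.1 < p.2
instance (coord : List Int) (dims : List Int) : Decidable (Pre_coord_to_site_index coord dims) := by unfold Pre_coord_to_site_index; infer_instance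

def pvWitness_coord_to_site_index : List Int × List Int := ([1, 2, 0], [3, 4, 2])

def Spec_coord_to_site_index (coord : List Int) (dims : List Int) (out : Int) : Prop := out = coord_to_site_index_alt coord dims
instance (coord : List Int) (dims : List Int) (out : Int) : Decidable (Spec_coord_to_site_index coord dims out) := by unfold Spec_coord_to_site_index; infer_instance

-- ===== CLAIM (what is proved, stated in full; the proofs are below) =====
def Claim_equal_coord_to_site_index : Prop := ∀ (coord : List Int) (dims : List Int), Dom_coord_to_site_index coord dims → Pre_coord_to_site_index coord dims → Spec_coord_to_site_index coord dims (coord_to_site_index coord dims)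

-- ===== LEMMAS AND PROOFS =====

-- the common value: x0 + L0*(x1 + L1*(x2 + ...))
def hornerF : List Int → List Int → Int
  | x :: c, l :: d => x + l * hornerF c d
  | _, _ => 0

-- shifting A's index loop past the head of both lists
theorem A_fold_shift (c0 d0 : Int) (c d : List Int) (st : Int × Int) (n : ℕ) :
    (PySem.List.pyRange 1 ((n : Int) + 1) 1).foldl
      (fun (st : Int × Int) a =>
        (st.1 + PySem.List.pyGetD (c0 :: c) a 0 * st.2, st.2 * PySem.List.pyGetD (d0 :: d) a 0)) st
    = (PySem.List.pyRange 0 (n : Int) 1).foldl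
      (fun (st : Int × Int) a =>
        (st.1 + PySem.List.pyGetD c a 0 * st.2, st.2 * PySem.List.pyGetD d a 0)) st := by
  rw [PySem.List.pyRange_one 1 ((n : Int) + 1), PySem.List.pyRange_one 0 (n : Int),
    List.foldl_map, List.foldl_map]
  have h1 : ((n : Int) + 1 - 1).toNat = n := by omega
  have h2 : ((n : Int) - 0).toNat = n := by omega
  rw [h1, h2]
  apply List.foldl_ext
  intro st k hk
  have hcast : (1 : Int) + (k : Int) = ((k + 1 : ℕ) : Int) := by push_cast; ring
  rw [hcast, PySem.List.pyGetD_natCast, PySem.List.pyGetD_natCast]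
  simp

theorem A_eq_horner (c : List Int) : ∀ (d : List Int), c.length = d.length → ∀ (i s : Int),
    ((PySem.List.pyRange 0 (d.length : Int) 1).foldl
      (fun (st : Int × Int) a =>
        (st.1 + PySem.List.pyGetD c a 0 * st.2, st.2 * PySem.List.pyGetD d a 0)) (i, s)).1
    = i + s * hornerF c d := by
  induction c with
  | nil =>
    intro d h i s
    have : d = [] := List.eq_nil_of_length_eq_zero (by simpa using h.symm)
    subst this
    simp [hornerF, PySem.List.pyRange_one_eq_nil]
  | cons c0 c ih =>
    intro d h i s
    match d with
    | d0 :: d =>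
      have hl : c.length = d.length := by simpa using h
      have hcons : PySem.List.pyRange 0 (((d0 :: d).length : Int)) 1
          = 0 :: PySem.List.pyRange 1 (((d0 :: d).length : Int)) 1 := by
        rw [PySem.List.pyRange_one_cons (by simp)]
        norm_num
      rw [hcons]
      simp only [List.foldl_cons]
      have hlen : (((d0 :: d).length : Int)) = (d.length : Int) + 1 := by simp
      rw [hlen]
      have := A_fold_shift c0 d0 c d
        ((i, s).1 + PySem.List.pyGetD (c0 :: c) 0 0 * (i, s).2,
         (i, s).2 * PySem.List.pyGetD (d0 :: d) 0 0) d.length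
      rw [this, ih d hl]
      simp [PySem.List.pyGetD_zero_cons, hornerF]
      ring

theorem B_fold_shift (c0 d0 : Int) (c d : List Int) (i : Int) (n : ℕ) :
    (PySem.List.pyRange (n : Int) 0 (-1)).foldl
      (fun idx a => idx * PySem.List.pyGetD (d0 :: d) a 0 + PySem.List.pyGetD (c0 :: c) a 0) i
    = (PySem.List.pyRange ((n : Int) - 1) (-1) (-1)).foldl
      (fun idx a => idx * PySem.List.pyGetD d a 0 + PySem.List.pyGetD c a 0) i := by
  rw [PySem.List.pyRange_neg_one, PySem.List.pyRange_neg_one, List.foldl_map, List.foldl_map]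
  have h1 : ((n : Int) - 0).toNat = n := by omega
  have h2 : ((n : Int) - 1 - (-1)).toNat = n := by omega
  rw [h1, h2]
  apply List.foldl_ext
  intro idx k hk
  have hk' : k < n := List.mem_range.mp hk
  have e1 : (n : Int) - (k : Int) = ((n - k - 1 + 1 : ℕ) : Int) := by omega
  have e2 : (n : Int) - 1 - (k : Int) = ((n - k - 1 : ℕ) : Int) := by omega
  rw [e1, e2, PySem.List.pyGetD_natCast, PySem.List.pyGetD_natCast,
    PySem.List.pyGetD_natCast, PySem.List.pyGetD_natCast]
  simp [List.getD]

theorem B_eq_horner (c : List Int) : ∀ (d : List Int), c.length = d.length →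
    coord_to_site_index_alt c d = hornerF c d := by
  induction c with
  | nil =>
    intro d h
    have : d = [] := List.eq_nil_of_length_eq_zero (by simpa using h.symm)
    subst this
    unfold coord_to_site_index_alt
    rw [show ((([] : List Int).length : Int) - 1) = (-1 : Int) by simp,
      PySem.List.pyRange_neg_one_eq_nil (le_refl _)]
    simp [hornerF]
  | cons c0 c ih =>
    intro d h
    match d with
    | d0 :: d =>
      have hl : c.length = d.length := by simpa using h
      unfold coord_to_site_index_alt
      have hstart : (((d0 :: d).length : Int)) - 1 = (d.length : Int) := by simp
      rw [hstart]
      have hsplit : PySem.List.pyRange (d.length : Int) (-1) (-1)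
          = PySem.List.pyRange (d.length : Int) 0 (-1) ++ [0] := by
        rw [PySem.List.pyRange_neg_one, PySem.List.pyRange_neg_one]
        have e1 : ((d.length : Int) - (-1)).toNat = d.length + 1 := by omega
        have e2 : ((d.length : Int) - 0).toNat = d.length := by omega
        rw [e1, e2, List.range_succ]
        simp
      rw [hsplit, List.foldl_append, B_fold_shift c0 d0 c d 0 d.length]
      have hinner : (PySem.List.pyRange ((d.length : Int) - 1) (-1) (-1)).foldl
          (fun idx a => idx * PySem.List.pyGetD d a 0 + PySem.List.pyGetD c a 0) 0
          = coord_to_site_index_alt c d := by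
        unfold coord_to_site_index_alt
        rfl
      rw [hinner, ih d hl]
      simp only [List.foldl_cons, List.foldl_nil, PySem.List.pyGetD_zero_cons, hornerF]
      ring

-- ===== VERDICT (by name: the statement is the Claim_ definition above) =====
theorem coord_to_site_index_spec : Claim_equal_coord_to_site_index := by
  intro coord dims _ hpre
  unfold Spec_coord_to_site_index coord_to_site_index
  rw [A_eq_horner coord dims hpre.1 0 1, B_eq_horner coord dims hpre.1]
  ring
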